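-- pv_equiv track=rewrite | github.com/Lightblues/Leetcode | contest/151-200/167.py | maxSideLength
-- ===== SOURCE A (Python) =====
-- from typing import List
--
-- def maxSideLength(mat: List[List[int]], threshold: int) -> int:
--     m,n = len(mat),len(mat[0])
--     acc = [[0]*(n+1) for _ in range(m+1)]
--     for i in range(m):
--         for j in range(n):
--             acc[i+1][j+1] = acc[i+1][j]+acc[i][j+1]-acc[i][j]+mat[i][j]
--     for k in range(min(m,n),0,-1):
--         for i in range(m-k+1):
--             for j in range(n-k+1):
--                 if acc[i+k][j+k]-acc[i+k][j]-acc[i][j+k]+acc[i][j]<=threshold: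
--                     return k
--     return 0
-- ===== SOURCE B (Python) =====
-- from typing import List
--
-- def maxSideLength(mat: List[List[int]], threshold: int) -> int:
--     m, n = len(mat), len(mat[0])
--     # per-column prefix sums: cols[j][i] = sum of mat[0..i-1][j]
--     cols = []
--     for j in range(n):
--         s = 0
--         c = [0]
--         for i in range(m):
--             s += mat[i][j]
--             c.append(s)
--         cols.append(c)
--     ans = 0
--     for k in range(1, min(m, n) + 1):
--         ok = False
--         for i in range(m - k + 1):
--             # 1D prefix over column-band sums for rows [i, i+k)
--             s = 0
--             wp = [0]
--             for j in range(n):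
--                 s += cols[j][i + k] - cols[j][i]
--                 wp.append(s)
--             for j in range(n - k + 1):
--                 if wp[j + k] - wp[j] <= threshold:
--                     ok = True
--                     break
--             if ok:
--                 break
--         if ok:
--             ans = k
--     return ans
-- ===== Notes on version B (the rewrite author's own statement) =====
-- stated objective: alternative
-- what changed: Replaces A's global 2D summed-area table queried by a descending-k early-return triple loop with per-column 1D prefix sums plus a fresh 1D prefix over column-band sums per (k,i), scanning k ascending and keeping the last feasible side; entries may be negative so all k must be checked and the asymptotics stay the same.
-- outside the precondition, e.g. on maxSideLength([], 0): A raises IndexError, B raises IndexError; on maxSideLength([[1, 2], [3]], 10): A raises IndexError, B raises IndexError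
import Mathlib
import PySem

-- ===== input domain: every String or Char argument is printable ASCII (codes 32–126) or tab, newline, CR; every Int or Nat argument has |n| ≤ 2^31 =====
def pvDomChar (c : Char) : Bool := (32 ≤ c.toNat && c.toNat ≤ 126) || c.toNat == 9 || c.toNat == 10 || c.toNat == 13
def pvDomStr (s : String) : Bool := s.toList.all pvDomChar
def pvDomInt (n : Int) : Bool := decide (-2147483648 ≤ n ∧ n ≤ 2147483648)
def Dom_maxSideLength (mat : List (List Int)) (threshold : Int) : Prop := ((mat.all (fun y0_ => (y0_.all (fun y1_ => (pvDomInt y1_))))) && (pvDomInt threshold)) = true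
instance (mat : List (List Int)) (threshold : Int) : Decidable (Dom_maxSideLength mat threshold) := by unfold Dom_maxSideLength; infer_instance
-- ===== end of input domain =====

-- B replaces A's single 2D summed-area table and descending-k early-return scan by per-column
-- 1D prefix sums plus a fresh 1D prefix over the column-band sums for each (k, i), scanning k
-- ascending and keeping the last feasible side (objective: alternative algorithm, same cost).

-- ===== PORT A =====
-- acc[i+1][j+1] = acc[i+1][j]+acc[i][j+1]-acc[i][j]+mat[i][j]  (in-place table update)
def pvAccStep (mat : List (List Int)) (i : Nat) (acc : List (List Int)) (j : Nat) : List (List Int) :=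
  acc.set (i+1) ((acc.getD (i+1) []).set (j+1)
    ((acc.getD (i+1) []).getD j 0 + (acc.getD i []).getD (j+1) 0
      - (acc.getD i []).getD j 0 + (mat.getD i []).getD j 0))

def pvAccRow (mat : List (List Int)) (n : Nat) (acc : List (List Int)) (i : Nat) : List (List Int) :=
  (List.range n).foldl (pvAccStep mat i) acc

def pvAccBuild (mat : List (List Int)) (m n : Nat) : List (List Int) :=
  (List.range m).foldl (pvAccRow mat n) (List.replicate (m+1) (List.replicate (n+1) (0:Int)))

-- for k in range(min(m,n),0,-1): for i: for j: if query ≤ threshold: return k  -- early return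
def pvALoop (acc : List (List Int)) (m n : Nat) (threshold : Int) : Nat → Int
  | 0 => 0
  | k+1 =>
    if (List.range (m - (k+1) + 1)).any (fun i =>
         (List.range (n - (k+1) + 1)).any (fun j =>
           decide ((acc.getD (i+(k+1)) []).getD (j+(k+1)) 0 - (acc.getD (i+(k+1)) []).getD j 0
             - (acc.getD i []).getD (j+(k+1)) 0 + (acc.getD i []).getD j 0 ≤ threshold)))
    then ((k : Int) + 1) else pvALoop acc m n threshold k

def maxSideLength (mat : List (List Int)) (threshold : Int) : Int :=
  let m := mat.length
  let n := (mat.headD []).length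
  pvALoop (pvAccBuild mat m n) m n threshold (min m n)

-- ===== PORT B =====
-- running-sum loop 's += f(i); lst.append(s)' building a 1D prefix list [0, f 0, f 0+f 1, …]
def pvPsum (f : Nat → Int) (t : Nat) : Int × List Int :=
  (List.range t).foldl (fun p i => (p.1 + f i, p.2 ++ [p.1 + f i])) (0, [0])

-- cols[j][i] = sum of mat[0..i-1][j]
def pvCols (mat : List (List Int)) (m n : Nat) : List (List Int) :=
  (List.range n).foldl (fun cs j => cs ++ [(pvPsum (fun i => (mat.getD i []).getD j 0) m).2]) []

-- for i: build wp (prefix of column-band sums), then scan windows; breaks = short-circuit any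
def pvFeasB (cols : List (List Int)) (m n k : Nat) (threshold : Int) : Bool :=
  (List.range (m - k + 1)).any (fun i =>
    let wp := (pvPsum (fun j => (cols.getD j []).getD (i+k) 0 - (cols.getD j []).getD i 0) n).2
    (List.range (n - k + 1)).any (fun j => decide (wp.getD (j+k) 0 - wp.getD j 0 ≤ threshold)))

def maxSideLength_alt (mat : List (List Int)) (threshold : Int) : Int :=
  let m := mat.length
  let n := (mat.headD []).length
  let cols := pvCols mat m n
  (List.range' 1 (min m n)).foldl
    (fun ans k => if pvFeasB cols m n k threshold then (k : Int) else ans) 0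

-- ===== PRECONDITION & SPEC =====
-- Pre_ excludes exactly the inputs where the Python A raises IndexError: the empty matrix
-- (mat[0]) and matrices with a row shorter than the first row (mat[i][j] during the prefix pass).
def Pre_maxSideLength (mat : List (List Int)) (threshold : Int) : Prop :=
  mat ≠ [] ∧ ∀ row ∈ mat, (mat.headD []).length ≤ row.length
instance (mat : List (List Int)) (threshold : Int) : Decidable (Pre_maxSideLength mat threshold) := by
  unfold Pre_maxSideLength; infer_instance

def pvWitness_maxSideLength : List (List Int) × Int := ([[1, 2], [3, 4]], 3)

def Spec_maxSideLength (mat : List (List Int)) (threshold : Int) (out : Int) : Prop := out = maxSideLength_alt mat threshold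
instance (mat : List (List Int)) (threshold : Int) (out : Int) : Decidable (Spec_maxSideLength mat threshold out) := by unfold Spec_maxSideLength; infer_instance

-- ===== CLAIM (what is proved, stated in full; the proofs are below) =====
def Claim_equal_maxSideLength : Prop := ∀ (mat : List (List Int)) (threshold : Int), Dom_maxSideLength mat threshold → Pre_maxSideLength mat threshold → Spec_maxSideLength mat threshold (maxSideLength mat threshold)

-- ===== LEMMAS AND PROOFS =====

-- matrix access as both ports perform it
def pvGetM (mat : List (List Int)) (i j : Nat) : Int := (mat.getD i []).getD j 0

-- 2D prefix sum
def pvP (mat : List (List Int)) (r c : Nat) : Int :=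
  ∑ x ∈ Finset.range r, ∑ y ∈ Finset.range c, pvGetM mat x y

-- square sum (the common value both feasibility tests compare with threshold)
def pvBox (mat : List (List Int)) (i j k : Nat) : Int :=
  ∑ x ∈ Finset.Ico i (i+k), ∑ y ∈ Finset.Ico j (j+k), pvGetM mat x y

-- ---- small getD utilities ----
theorem pv_getD_set_self {α : Type} (l : List α) (r : Nat) (v d : α) (h : r < l.length) :
    (l.set r v).getD r d = v := by
  simp [List.getD_eq_getElem?_getD, List.getElem?_set_self, h]

theorem pv_getD_set_ne {α : Type} (l : List α) (r r' : Nat) (v d : α) (h : r' ≠ r) :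
    (l.set r v).getD r' d = l.getD r' d := by
  simp [List.getD_eq_getElem?_getD, List.getElem?_set_ne (Ne.symm h)]

theorem pv_getD_replicate {α : Type} (t r : Nat) (v d : α) (h : r < t) :
    (List.replicate t v).getD r d = v := by
  simp [List.getD_eq_getElem?_getD, List.getElem?_replicate, h]

theorem pv_getD_map_range (g : Nat → Int) (t c : Nat) (h : c < t) :
    ((List.range t).map g).getD c 0 = g c := by
  simp [List.getD_eq_getElem?_getD, List.getElem?_map, List.getElem?_range, h]

-- ---- pvPsum characterisation ----
theorem pvPsum_eq (f : Nat → Int) (t : Nat) :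
    pvPsum f t = (∑ i ∈ Finset.range t, f i,
      (List.range (t+1)).map (fun c => ∑ i ∈ Finset.range c, f i)) := by
  induction t with
  | zero => simp [pvPsum]
  | succ t ih =>
    unfold pvPsum at ih ⊢
    rw [List.range_succ, List.foldl_append, ih]
    simp [List.range_succ, Finset.sum_range_succ]

theorem pvPsum_getD (f : Nat → Int) (t c : Nat) (h : c ≤ t) :
    (pvPsum f t).2.getD c 0 = ∑ i ∈ Finset.range c, f i := by
  rw [pvPsum_eq]
  exact pv_getD_map_range _ _ _ (by omega)

-- ---- pvCols characterisation ----
theorem pv_foldl_append {α β : Type} (g : α → β) (l : List α) (init : List β) :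
    l.foldl (fun acc x => acc ++ [g x]) init = init ++ l.map g := by
  induction l generalizing init with
  | nil => simp
  | cons a l ih => simp [List.foldl_cons, ih]

theorem pvCols_getD (mat : List (List Int)) (m n j r : Nat) (hj : j < n) (hr : r ≤ m) :
    ((pvCols mat m n).getD j []).getD r 0 = ∑ x ∈ Finset.range r, pvGetM mat x j := by
  unfold pvCols
  rw [pv_foldl_append, List.nil_append]
  have h1 : ((List.range n).map (fun j => (pvPsum (fun i => (mat.getD i []).getD j 0) m).2)).getD j []
      = (pvPsum (fun i => (mat.getD i []).getD j 0) m).2 := by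
    simp [List.getD_eq_getElem?_getD, hj]
  rw [h1, pvPsum_getD _ _ _ hr]
  simp [pvGetM]

-- ---- prefix-sum algebra ----
theorem pvP_succ_succ (mat : List (List Int)) (i j : Nat) :
    pvP mat (i+1) (j+1) = pvP mat (i+1) j + pvP mat i (j+1) - pvP mat i j + pvGetM mat i j := by
  simp [pvP, Finset.sum_range_succ]
  ring

theorem pvP_zero_right (mat : List (List Int)) (r : Nat) : pvP mat r 0 = 0 := by
  simp [pvP]

theorem pvA_val (mat : List (List Int)) (i j k : Nat) :
    pvP mat (i+k) (j+k) - pvP mat (i+k) j - pvP mat i (j+k) + pvP mat i j = pvBox mat i j k := by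
  unfold pvP pvBox
  have hrow : ∀ x : Nat, (∑ y ∈ Finset.range (j+k), pvGetM mat x y) - ∑ y ∈ Finset.range j, pvGetM mat x y
      = ∑ y ∈ Finset.Ico j (j+k), pvGetM mat x y := by
    intro x
    rw [Finset.sum_Ico_eq_sub _ (by omega : j ≤ j + k)]
  have hcol : ∀ c : Nat, (∑ x ∈ Finset.range (i+k), ∑ y ∈ Finset.range c, pvGetM mat x y)
      - ∑ x ∈ Finset.range i, ∑ y ∈ Finset.range c, pvGetM mat x y
      = ∑ x ∈ Finset.Ico i (i+k), ∑ y ∈ Finset.range c, pvGetM mat x y := by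
    intro c
    rw [Finset.sum_Ico_eq_sub _ (by omega : i ≤ i + k)]
  calc (∑ x ∈ Finset.range (i+k), ∑ y ∈ Finset.range (j+k), pvGetM mat x y)
      - (∑ x ∈ Finset.range (i+k), ∑ y ∈ Finset.range j, pvGetM mat x y)
      - (∑ x ∈ Finset.range i, ∑ y ∈ Finset.range (j+k), pvGetM mat x y)
      + (∑ x ∈ Finset.range i, ∑ y ∈ Finset.range j, pvGetM mat x y)
      = ((∑ x ∈ Finset.range (i+k), ∑ y ∈ Finset.range (j+k), pvGetM mat x y)
          - ∑ x ∈ Finset.range i, ∑ y ∈ Finset.range (j+k), pvGetM mat x y)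
        - ((∑ x ∈ Finset.range (i+k), ∑ y ∈ Finset.range j, pvGetM mat x y)
          - ∑ x ∈ Finset.range i, ∑ y ∈ Finset.range j, pvGetM mat x y) := by ring
    _ = (∑ x ∈ Finset.Ico i (i+k), ∑ y ∈ Finset.range (j+k), pvGetM mat x y)
        - ∑ x ∈ Finset.Ico i (i+k), ∑ y ∈ Finset.range j, pvGetM mat x y := by rw [hcol, hcol]
    _ = ∑ x ∈ Finset.Ico i (i+k), ((∑ y ∈ Finset.range (j+k), pvGetM mat x y) - ∑ y ∈ Finset.range j, pvGetM mat x y) := by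
        rw [Finset.sum_sub_distrib]
    _ = ∑ x ∈ Finset.Ico i (i+k), ∑ y ∈ Finset.Ico j (j+k), pvGetM mat x y := by
        exact Finset.sum_congr rfl (fun x _ => hrow x)

theorem pvB_val (mat : List (List Int)) (i j k : Nat) :
    (∑ y ∈ Finset.range (j+k), ((∑ x ∈ Finset.range (i+k), pvGetM mat x y) - ∑ x ∈ Finset.range i, pvGetM mat x y))
      - (∑ y ∈ Finset.range j, ((∑ x ∈ Finset.range (i+k), pvGetM mat x y) - ∑ x ∈ Finset.range i, pvGetM mat x y))
      = pvBox mat i j k := by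
  unfold pvBox
  have hy : ∀ y : Nat, (∑ x ∈ Finset.range (i+k), pvGetM mat x y) - ∑ x ∈ Finset.range i, pvGetM mat x y
      = ∑ x ∈ Finset.Ico i (i+k), pvGetM mat x y := by
    intro y
    rw [Finset.sum_Ico_eq_sub _ (by omega : i ≤ i + k)]
  have h2 := Finset.sum_Ico_eq_sub (fun y => (∑ x ∈ Finset.range (i+k), pvGetM mat x y) - ∑ x ∈ Finset.range i, pvGetM mat x y) (by omega : j ≤ j + k)
  have h3 : (∑ y ∈ Finset.Ico j (j+k), ((∑ x ∈ Finset.range (i+k), pvGetM mat x y) - ∑ x ∈ Finset.range i, pvGetM mat x y))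
      = ∑ x ∈ Finset.Ico i (i+k), ∑ y ∈ Finset.Ico j (j+k), pvGetM mat x y := by
    rw [Finset.sum_congr rfl (fun y _ => hy y)]
    exact Finset.sum_comm
  beta_reduce at h2
  rw [← h2]
  exact h3

-- ---- the acc-table invariant ----
def pvCond (i j r c : Nat) : Bool := decide (r ≤ i) || (decide (r = i+1) && decide (c ≤ j))

def pvInv (mat : List (List Int)) (m n i j : Nat) (acc : List (List Int)) : Prop :=
  acc.length = m+1 ∧ (∀ r, r ≤ m → (acc.getD r []).length = n+1) ∧
  ∀ r c, r ≤ m → c ≤ n →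
    (acc.getD r []).getD c 0 = if pvCond i j r c then pvP mat r c else 0

theorem pvInv_init (mat : List (List Int)) (m n : Nat) :
    pvInv mat m n 0 0 (List.replicate (m+1) (List.replicate (n+1) (0:Int))) := by
  refine ⟨by simp, fun r hr => by rw [pv_getD_replicate _ _ _ _ (by omega)]; simp, fun r c hr hc => ?_⟩
  rw [pv_getD_replicate _ _ _ _ (by omega), pv_getD_replicate _ _ _ _ (by omega)]
  split_ifs with h
  · simp only [pvCond, Bool.or_eq_true, Bool.and_eq_true, decide_eq_true_eq] at h
    rcases h with h | ⟨h1, h2⟩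
    · have hr0 : r = 0 := by omega
      simp [hr0, pvP]
    · have hc0 : c = 0 := by omega
      rw [hc0, pvP_zero_right]
  · rfl

theorem pvInv_step (mat : List (List Int)) (m n i j : Nat) (acc : List (List Int))
    (hi : i < m) (hj : j < n) (h : pvInv mat m n i j acc) :
    pvInv mat m n i (j+1) (pvAccStep mat i acc j) := by
  obtain ⟨hlen, hrlen, hval⟩ := h
  have hlen1 : i + 1 < acc.length := by omega
  have hrow : (acc.getD (i+1) []).length = n+1 := hrlen (i+1) (by omega)
  unfold pvAccStep
  refine ⟨by simp [hlen], ?_, ?_⟩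
  · intro r hr
    by_cases hre : r = i+1
    · subst hre
      rw [pv_getD_set_self _ _ _ _ hlen1, List.length_set]
      exact hrow
    · rw [pv_getD_set_ne _ _ _ _ _ hre]
      exact hrlen r hr
  · intro r c hr hc
    by_cases hre : r = i+1
    · subst hre
      rw [pv_getD_set_self _ _ _ _ hlen1]
      by_cases hce : c = j+1
      · subst hce
        rw [pv_getD_set_self _ _ _ _ (by omega : j+1 < (acc.getD (i+1) []).length)]
        have e1 : (acc.getD (i+1) []).getD j 0 = pvP mat (i+1) j := by
          rw [hval (i+1) j (by omega) (by omega)]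
          simp [pvCond]
        have e2 : (acc.getD i []).getD (j+1) 0 = pvP mat i (j+1) := by
          rw [hval i (j+1) (by omega) (by omega)]
          simp [pvCond]
        have e3 : (acc.getD i []).getD j 0 = pvP mat i j := by
          rw [hval i j (by omega) (by omega)]
          simp [pvCond]
        rw [e1, e2, e3]
        have hcnd : pvCond i (j+1) (i+1) (j+1) = true := by simp [pvCond]
        rw [hcnd, if_pos rfl, pvP_succ_succ]
        unfold pvGetM
        ring
      · rw [pv_getD_set_ne _ _ _ _ _ hce]
        rw [hval (i+1) c (by omega) hc]
        have hcnd : pvCond i (j+1) (i+1) c = pvCond i j (i+1) c := by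
          have hiff : (c ≤ j+1) ↔ (c ≤ j) := by omega
          simp [pvCond, hiff]
        rw [hcnd]
    · rw [pv_getD_set_ne _ _ _ _ _ hre]
      rw [hval r c hr hc]
      have hcnd : pvCond i (j+1) r c = pvCond i j r c := by
        simp [pvCond, hre]
      rw [hcnd]

theorem pvInv_row (mat : List (List Int)) (m n i : Nat) (acc : List (List Int))
    (hi : i < m) (h : pvInv mat m n i 0 acc) :
    pvInv mat m n i n (pvAccRow mat n acc i) := by
  have key : ∀ t, t ≤ n → pvInv mat m n i t ((List.range t).foldl (pvAccStep mat i) acc) := by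
    intro t
    induction t with
    | zero => intro _; simpa using h
    | succ t ih =>
      intro ht
      rw [List.range_succ, List.foldl_append]
      simp only [List.foldl_cons, List.foldl_nil]
      exact pvInv_step mat m n i t _ hi (by omega) (ih (by omega))
  exact key n le_rfl

theorem pvInv_next (mat : List (List Int)) (m n i : Nat) (acc : List (List Int))
    (h : pvInv mat m n i n acc) : pvInv mat m n (i+1) 0 acc := by
  obtain ⟨hlen, hrlen, hval⟩ := h
  refine ⟨hlen, hrlen, ?_⟩
  intro r c hr hc
  rw [hval r c hr hc]
  split_ifs with h1 h2 h3
  · rfl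
  · exfalso
    simp only [pvCond, Bool.or_eq_true, Bool.and_eq_true, decide_eq_true_eq] at h1 h2
    omega
  · have hc0 : c = 0 := by
      simp only [pvCond, Bool.or_eq_true, Bool.and_eq_true, decide_eq_true_eq] at h1 h3
      omega
    rw [hc0, pvP_zero_right]
  · rfl

theorem pvAccBuild_getD (mat : List (List Int)) (m n r c : Nat) (hr : r ≤ m) (hc : c ≤ n) :
    ((pvAccBuild mat m n).getD r []).getD c 0 = pvP mat r c := by
  have key : ∀ t, t ≤ m → pvInv mat m n t 0
      ((List.range t).foldl (pvAccRow mat n) (List.replicate (m+1) (List.replicate (n+1) (0:Int)))) := by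
    intro t
    induction t with
    | zero => intro _; exact pvInv_init mat m n
    | succ t ih =>
      intro ht
      rw [List.range_succ, List.foldl_append]
      simp only [List.foldl_cons, List.foldl_nil]
      exact pvInv_next mat m n t _ (pvInv_row mat m n t _ (by omega) (ih (by omega)))
  obtain ⟨_, _, hval⟩ := key m le_rfl
  rw [show pvAccBuild mat m n = (List.range m).foldl (pvAccRow mat n) (List.replicate (m+1) (List.replicate (n+1) (0:Int))) from rfl]
  rw [hval r c hr hc]
  have hcnd : pvCond m 0 r c = true := by
    simp only [pvCond, Bool.or_eq_true, Bool.and_eq_true, decide_eq_true_eq]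
    omega
  rw [hcnd, if_pos rfl]

-- ---- any congruence ----
theorem pv_any_congr {α : Type} (l : List α) (f g : α → Bool) (h : ∀ x ∈ l, f x = g x) :
    l.any f = l.any g := by
  induction l with
  | nil => rfl
  | cons a l ih =>
    simp only [List.any_cons, h a (List.mem_cons_self), ih (fun x hx => h x (List.mem_cons_of_mem a hx))]

-- ---- predicate equality for each k ----
theorem pvPred_eq (mat : List (List Int)) (threshold : Int) (m n k : Nat)
    (hm : m = mat.length) (hn : n = (mat.headD []).length) (hk1 : 1 ≤ k) (hkm : k ≤ m) (hkn : k ≤ n) :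
    ((List.range (m - k + 1)).any (fun i =>
      (List.range (n - k + 1)).any (fun j =>
        decide (((pvAccBuild mat m n).getD (i+k) []).getD (j+k) 0 - ((pvAccBuild mat m n).getD (i+k) []).getD j 0
          - ((pvAccBuild mat m n).getD i []).getD (j+k) 0 + ((pvAccBuild mat m n).getD i []).getD j 0 ≤ threshold))))
    = pvFeasB (pvCols mat m n) m n k threshold := by
  unfold pvFeasB
  apply pv_any_congr
  intro i hi
  rw [List.mem_range] at hi
  have hik : i + k ≤ m := by omega
  apply pv_any_congr
  intro j hj
  rw [List.mem_range] at hj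
  have hjk : j + k ≤ n := by omega
  apply decide_eq_decide.mpr
  have hA : ((pvAccBuild mat m n).getD (i+k) []).getD (j+k) 0 - ((pvAccBuild mat m n).getD (i+k) []).getD j 0
      - ((pvAccBuild mat m n).getD i []).getD (j+k) 0 + ((pvAccBuild mat m n).getD i []).getD j 0
      = pvBox mat i j k := by
    rw [pvAccBuild_getD mat m n (i+k) (j+k) hik hjk, pvAccBuild_getD mat m n (i+k) j hik (by omega),
        pvAccBuild_getD mat m n i (j+k) (by omega) hjk, pvAccBuild_getD mat m n i j (by omega) (by omega)]
    exact pvA_val mat i j k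
  have hB : (pvPsum (fun j' => ((pvCols mat m n).getD j' []).getD (i+k) 0 - ((pvCols mat m n).getD j' []).getD i 0) n).2.getD (j+k) 0
      - (pvPsum (fun j' => ((pvCols mat m n).getD j' []).getD (i+k) 0 - ((pvCols mat m n).getD j' []).getD i 0) n).2.getD j 0
      = pvBox mat i j k := by
    rw [pvPsum_getD _ n (j+k) hjk, pvPsum_getD _ n j (by omega)]
    have hf : ∀ y, y < n →
        ((pvCols mat m n).getD y []).getD (i+k) 0 - ((pvCols mat m n).getD y []).getD i 0
        = (∑ x ∈ Finset.range (i+k), pvGetM mat x y) - ∑ x ∈ Finset.range i, pvGetM mat x y := by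
      intro y hy
      rw [pvCols_getD mat m n y (i+k) hy hik, pvCols_getD mat m n y i hy (by omega)]
    rw [Finset.sum_congr rfl (fun y hy => hf y (by rw [Finset.mem_range] at hy; omega)),
        Finset.sum_congr rfl (fun y hy => hf y (by rw [Finset.mem_range] at hy; omega))]
    exact pvB_val mat i j k
  rw [hA, hB]

-- ---- scan equivalence: descending first hit = ascending overwrite ----
theorem pvScan_eq (acc cols : List (List Int)) (mat : List (List Int)) (m n : Nat) (threshold : Int)
    (K : Nat) (hK : ∀ k, 1 ≤ k → k ≤ K →
      ((List.range (m - k + 1)).any (fun i =>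
        (List.range (n - k + 1)).any (fun j =>
          decide ((acc.getD (i+k) []).getD (j+k) 0 - (acc.getD (i+k) []).getD j 0
            - (acc.getD i []).getD (j+k) 0 + (acc.getD i []).getD j 0 ≤ threshold))))
      = pvFeasB cols m n k threshold) :
    pvALoop acc m n threshold K
      = (List.range' 1 K).foldl (fun ans k => if pvFeasB cols m n k threshold then (k : Int) else ans) 0 := by
  induction K with
  | zero => simp [pvALoop]
  | succ K ih =>
    have hconcat : List.range' 1 (K+1) = List.range' 1 K ++ [K+1] := by
      rw [List.range'_concat]
      ring_nf
    rw [hconcat, List.foldl_append]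
    simp only [List.foldl_cons, List.foldl_nil]
    show (if _ then _ else _) = _
    rw [hK (K+1) (by omega) (by omega)]
    by_cases hb : pvFeasB cols m n (K+1) threshold
    · simp [hb]
    · rw [if_neg (by simp [hb]), if_neg (by simp [hb])]
      exact ih (fun k h1 h2 => hK k h1 (by omega))

-- ===== VERDICT (by name: the statement is the Claim_ definition above) =====
theorem maxSideLength_spec : Claim_equal_maxSideLength := by
  intro mat threshold _hdom _hpre
  unfold Spec_maxSideLength maxSideLength maxSideLength_alt
  exact pvScan_eq (pvAccBuild mat mat.length (mat.headD []).length) (pvCols mat mat.length (mat.headD []).length)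
    mat mat.length (mat.headD []).length threshold (min mat.length (mat.headD []).length)
    (fun k hk1 hkK => pvPred_eq mat threshold _ _ k rfl rfl hk1 (le_trans hkK (min_le_left _ _)) (le_trans hkK (min_le_right _ _)))
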